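-- pv_equiv track=rewrite | github.com/janezaletskaya/algorithms | algorithm_training_2024/week2/G.py | solution
-- ===== SOURCE A (Python) =====
-- class CensorCount:
--
--     def __init__(self):
--         self.queue = []
--         self.c = 0
--         self.cnt_a = 0
--         self.cnt_b = 0
--         self.head = 0
--
--     def _empty(self):
--         return self.head >= len(self.queue)
--
--     def _pop(self):
--         item = self.queue[self.head]
--         self.head += 1
--         return item
--
--     def add(self, sym, idx):
--         if sym == 'a':
--             self.cnt_a += 1
--
--         elif sym == 'b':
--             if self._empty():
--                 return self.c
--
--             self.cnt_b += 1
--             self.c += self.cnt_a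
--
--         else:
--             return self.c
--
--         self.queue.append((sym, idx))
--
--         return self.c
--
--     def pop(self):
--         if self._empty():
--             raise Exception("Empty queue")
--
--         elem = self._pop()
--         assert elem[0] == 'a'
--
--         self.cnt_a -= 1
--         self.c -= self.cnt_b
--
--         while not self._empty() and self.queue[self.head][0] != 'a':
--             self._pop()
--             self.cnt_b -= 1
--
--         return elem[1]
--
-- def solution(string, c_limit):
--     max_len = 0
--     start = 0
--     cc = CensorCount()
--     for i in range(len(string)):
--         c = cc.add(string[i], i)
--
--         if c > c_limit:
--             max_len = max(max_len, i - start)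
--
--             while c > c_limit:
--                 start = cc.pop() + 1
--                 c = cc.c
--
--     max_len = max(max_len, len(string) - start)
--
--     return max_len
-- ===== SOURCE B (Python) =====
-- def solution(string, c_limit):
--     n = len(string)
--     pa = [0]; pb = [0]; pp = [0]
--     a = b = p = 0
--     for ch in string:
--         if ch == 'a':
--             a += 1
--         elif ch == 'b':
--             b += 1
--             p += a
--         pa.append(a); pb.append(b); pp.append(p)
--     best = 0
--     for r in range(1, n + 1):
--         lo, hi = 0, r
--         while lo < hi:
--             mid = (lo + hi) // 2
--             if pp[r] - pp[mid] - pa[mid] * (pb[r] - pb[mid]) <= c_limit: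
--                 hi = mid
--             else:
--                 lo = mid + 1
--         best = max(best, r - lo)
--     return best
-- ===== Notes on version B (the rewrite author's own statement) =====
-- stated objective: alternative
-- what changed: B abandons the sliding-window queue entirely: it builds three prefix-sum arrays (a-count, b-count, pair-count) in one pass and then, for each right end r independently, binary-searches the minimal left end l whose pair count pp[r]-pp[l]-pa[l]*(pb[r]-pb[l]) is within c_limit, taking the best r-l.
import Mathlib
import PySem

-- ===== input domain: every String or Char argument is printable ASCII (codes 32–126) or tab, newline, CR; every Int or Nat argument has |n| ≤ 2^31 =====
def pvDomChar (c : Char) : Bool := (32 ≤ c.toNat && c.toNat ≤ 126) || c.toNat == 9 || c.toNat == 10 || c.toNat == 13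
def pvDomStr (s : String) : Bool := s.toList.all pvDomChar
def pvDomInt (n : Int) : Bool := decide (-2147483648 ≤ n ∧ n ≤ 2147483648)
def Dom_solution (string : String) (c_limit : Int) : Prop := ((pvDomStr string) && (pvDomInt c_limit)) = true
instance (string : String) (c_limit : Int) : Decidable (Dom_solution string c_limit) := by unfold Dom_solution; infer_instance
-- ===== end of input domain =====

-- B replaces A's online sliding-window queue by an offline scheme: prefix-sum arrays
-- plus an independent binary search per right end (objective: alternative algorithm).

-- ===== PORT A =====
-- The Python CensorCount keeps `queue` plus a moving `head` index and only ever reads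
-- queue[head:]; the port represents that live part functionally (append at the tail,
-- pop at the head), which is the same queue discipline step for step.
structure CC where
  queue : List (Char × Int)
  c : Int
  cnt_a : Int
  cnt_b : Int
deriving Repr, DecidableEq

-- CensorCount.add
def ccAdd (cc : CC) (sym : Char) (idx : Int) : CC × Int :=
  if sym = 'a' then
    let cc' : CC := { cc with cnt_a := cc.cnt_a + 1, queue := cc.queue ++ [(sym, idx)] }
    (cc', cc'.c)
  else if sym = 'b' then
    if cc.queue.isEmpty then (cc, cc.c)
    else
      let cc' : CC := { cc with cnt_b := cc.cnt_b + 1, c := cc.c + cc.cnt_a, queue := cc.queue ++ [(sym, idx)] }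
      (cc', cc'.c)
  else (cc, cc.c)

-- the `while not self._empty() and self.queue[self.head][0] != 'a'` loop of CensorCount.pop
def ccDropBs : List (Char × Int) → Int → List (Char × Int) × Int
  | [], cnt_b => ([], cnt_b)
  | (sym, idx) :: rest, cnt_b =>
    if sym ≠ 'a' then ccDropBs rest (cnt_b - 1) else ((sym, idx) :: rest, cnt_b)

-- CensorCount.pop; `none` = the `raise`/failed assert (never reached under Pre_)
def ccPop (cc : CC) : Option (CC × Int) :=
  match cc.queue with
  | [] => none
  | (sym, idx) :: rest =>
    if sym = 'a' then
      let res := ccDropBs rest cc.cnt_b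
      some ({ queue := res.1, c := cc.c - cc.cnt_b, cnt_a := cc.cnt_a - 1, cnt_b := res.2 }, idx)
    else none

-- the `while c > c_limit:` loop inside solution
def ccShrink : Nat → CC → Int → Int → Int → Option (CC × Int)
  | 0, _, _, _, _ => none  -- fuel guard only; never reached (each pop shortens the queue)
  | fuel + 1, cc, c, c_limit, start =>
    if c > c_limit then
      match ccPop cc with
      | none => none
      | some (cc', idx) => ccShrink fuel cc' cc'.c c_limit (idx + 1)
    else some (cc, start)

-- the `for i in range(len(string))` loop of solution
def loopA : Nat → List Char → Int → Int → CC → Int → Int → Option (Int × Int)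
  | 0, _, _, _, _, _, _ => none  -- fuel guard only; fuel = len+1 always suffices
  | fuel + 1, s, c_limit, i, cc, start, max_len =>
    if i < (s.length : Int) then
      match PySem.List.pyGet? s i with
      | none => none
      | some ch =>
        let r := ccAdd cc ch i
        if r.2 > c_limit then
          match ccShrink (s.length + 1) r.1 r.2 c_limit start with
          | none => none
          | some (cc2, start') => loopA fuel s c_limit (i + 1) cc2 start' (max max_len (i - start))
        else loopA fuel s c_limit (i + 1) r.1 start max_len
    else some (max_len, start)

def solution (string : String) (c_limit : Int) : Int :=
  match loopA (string.toList.length + 1) string.toList c_limit 0 ⟨[], 0, 0, 0⟩ 0 0 with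
  | some r => max r.1 (PySem.Str.len string - r.2)
  | none => 0

-- ===== PORT B =====
-- the `for ch in string` pass building the prefix lists pa, pb, pp
def buildB : List Char → List Int → List Int → List Int → Int → Int → Int →
    List Int × List Int × List Int
  | [], pa, pb, pp, _, _, _ => (pa, pb, pp)
  | ch :: rest, pa, pb, pp, a, b, p =>
    let a' := if ch = 'a' then a + 1 else a
    let b' := if ch = 'a' then b else if ch = 'b' then b + 1 else b
    let p' := if ch = 'a' then p else if ch = 'b' then p + a else p
    buildB rest (pa ++ [a']) (pb ++ [b']) (pp ++ [p']) a' b' p'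

-- list indexing pa[i]; every index B uses is in range, where pyGet? is exact (getD 0 unreached)
def getI (l : List Int) (i : Int) : Int := (PySem.List.pyGet? l i).getD 0

-- the `while lo < hi` binary-search loop
def bsearchB : Nat → List Int → List Int → List Int → Int → Int → Int → Int → Option Int
  | 0, _, _, _, _, _, _, _ => none  -- fuel guard only; fuel = len+1 always suffices
  | fuel + 1, pa, pb, pp, c_limit, r, lo, hi =>
    if lo < hi then
      let mid := PySem.Int.floordiv (lo + hi) 2
      if getI pp r - getI pp mid - getI pa mid * (getI pb r - getI pb mid) ≤ c_limit then
        bsearchB fuel pa pb pp c_limit r lo mid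
      else
        bsearchB fuel pa pb pp c_limit r (mid + 1) hi
    else some lo

-- the `for r in range(1, n + 1)` loop
def outerB : Nat → List Int → List Int → List Int → Int → Int → Int → Int → Option Int
  | 0, _, _, _, _, _, _, _ => none  -- fuel guard only; fuel = len+1 always suffices
  | fuel + 1, pa, pb, pp, c_limit, n, r, best =>
    if r < n + 1 then
      match bsearchB (n.toNat + 1) pa pb pp c_limit r 0 r with
      | none => none
      | some lo => outerB fuel pa pb pp c_limit n (r + 1) (max best (r - lo))
    else some best

def solution_alt (string : String) (c_limit : Int) : Int :=
  let s := string.toList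
  let pre := buildB s [0] [0] [0] 0 0 0
  match outerB (s.length + 1) pre.1 pre.2.1 pre.2.2 c_limit (s.length : Int) 1 0 with
  | some best => best
  | none => 0

-- ===== PRECONDITION & SPEC =====
-- Pre_ excludes nonempty strings with negative c_limit: there Python A always raises
-- (its shrink loop empties the queue and `pop` raises "Empty queue").
def Pre_solution (string : String) (c_limit : Int) : Prop := string = "" ∨ 0 ≤ c_limit
instance (string : String) (c_limit : Int) : Decidable (Pre_solution string c_limit) := by
  unfold Pre_solution; infer_instance

def pvWitness_solution : String × Int := ("abcab", 1)

def Spec_solution (string : String) (c_limit : Int) (out : Int) : Prop := out = solution_alt string c_limit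
instance (string : String) (c_limit : Int) (out : Int) : Decidable (Spec_solution string c_limit out) := by
  unfold Spec_solution; infer_instance

-- ===== CLAIM (what is proved, stated in full; the proofs are below) =====
def Claim_equal_solution : Prop := ∀ (string : String) (c_limit : Int), Dom_solution string c_limit → Pre_solution string c_limit → Spec_solution string c_limit (solution string c_limit)

-- ===== LEMMAS AND PROOFS =====

def chAt (s : List Char) (j : Nat) : Char := (s[j]?).getD ' '

-- first index k ∈ [j, w) with s[k] = 'a' (w if none)
def faW (s : List Char) (j w : Nat) : Nat :=
  if _h : j < w then (if chAt s (j) = 'a' then j else faW s (j + 1) w) else w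
termination_by w - j

-- the queue A holds: all 'a'/'b' characters of [j, w), in order
def segQ (s : List Char) (j w : Nat) : List (Char × Int) :=
  if _h : j < w then
    (if chAt s (j) = 'a' ∨ chAt s (j) = 'b' then [(chAt s (j), (j : Int))] else []) ++ segQ s (j + 1) w
  else []
termination_by w - j

def cntC (ch : Char) (s : List Char) (j w : Nat) : Nat :=
  if _h : j < w then (if chAt s (j) = ch then 1 else 0) + cntC ch s (j + 1) w else 0
termination_by w - j

-- number of pairs (an 'a' strictly before a 'b') inside [j, w)
def pairC (s : List Char) (j w : Nat) : Nat :=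
  if _h : j < w then (if chAt s (j) = 'a' then cntC 'b' s (j + 1) w else 0) + pairC s (j + 1) w else 0
termination_by w - j

-- least l ∈ [j, w] with pairC s l w ≤ lim, scanning up (w if none below w)
def mnl (s : List Char) (lim : Int) (j w : Nat) : Nat :=
  if _h : j < w then (if (pairC s j w : Int) ≤ lim then j else mnl s lim (j + 1) w) else w
termination_by w - j

-- max over r ∈ [w, n] of r - mnl s lim 0 r
def MX (s : List Char) (lim : Int) (w n : Nat) : Int :=
  if _h : w < n then max ((w : Int) - (mnl s lim 0 w : Int)) (MX s lim (w + 1) n)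
  else ((n : Int) - (mnl s lim 0 n : Int))
termination_by n - w

def QInv (s : List Char) (start w : Nat) (cc : CC) : Prop :=
  start ≤ w ∧ w ≤ s.length ∧
  cc.queue = segQ s (faW s start w) w ∧
  cc.cnt_a = (cntC 'a' s (faW s start w) w : Int) ∧
  cc.cnt_b = (cntC 'b' s (faW s start w) w : Int) ∧
  cc.c = (pairC s (faW s start w) w : Int)

-- start is exactly the minimal valid left end for window end w
def MInv (s : List Char) (lim : Int) (start w : Nat) : Prop :=
  (pairC s start w : Int) ≤ lim ∧ ∀ l : Nat, l < start → lim < (pairC s l w : Int)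

theorem faW_step (s : List Char) (j w : Nat) (h : j < w) :
    faW s j w = if chAt s (j) = 'a' then j else faW s (j + 1) w := by
  rw [faW, dif_pos h]

theorem faW_stop (s : List Char) (j w : Nat) (h : ¬ j < w) : faW s j w = w := by
  rw [faW, dif_neg h]

theorem cntC_step (ch : Char) (s : List Char) (j w : Nat) (h : j < w) :
    cntC ch s j w = (if chAt s (j) = ch then 1 else 0) + cntC ch s (j + 1) w := by
  rw [cntC, dif_pos h]

theorem cntC_stop (ch : Char) (s : List Char) (j w : Nat) (h : ¬ j < w) : cntC ch s j w = 0 := by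
  rw [cntC, dif_neg h]

theorem pairC_step (s : List Char) (j w : Nat) (h : j < w) :
    pairC s j w = (if chAt s (j) = 'a' then cntC 'b' s (j + 1) w else 0) + pairC s (j + 1) w := by
  rw [pairC, dif_pos h]

theorem pairC_stop (s : List Char) (j w : Nat) (h : ¬ j < w) : pairC s j w = 0 := by
  rw [pairC, dif_neg h]

theorem segQ_step (s : List Char) (j w : Nat) (h : j < w) :
    segQ s j w = (if chAt s (j) = 'a' ∨ chAt s (j) = 'b'
      then [(chAt s (j), (j : Int))] else []) ++ segQ s (j + 1) w := by
  rw [segQ, dif_pos h]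

theorem segQ_stop (s : List Char) (j w : Nat) (h : ¬ j < w) : segQ s j w = [] := by
  rw [segQ, dif_neg h]

theorem mnl_step (s : List Char) (lim : Int) (j w : Nat) (h : j < w) :
    mnl s lim j w = if (pairC s j w : Int) ≤ lim then j else mnl s lim (j + 1) w := by
  rw [mnl, dif_pos h]

theorem mnl_stop (s : List Char) (lim : Int) (j w : Nat) (h : ¬ j < w) : mnl s lim j w = w := by
  rw [mnl, dif_neg h]

theorem MX_step (s : List Char) (lim : Int) (w n : Nat) (h : w < n) :
    MX s lim w n = max ((w : Int) - (mnl s lim 0 w : Int)) (MX s lim (w + 1) n) := by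
  rw [MX, dif_pos h]

theorem MX_stop (s : List Char) (lim : Int) (w n : Nat) (h : ¬ w < n) :
    MX s lim w n = ((n : Int) - (mnl s lim 0 n : Int)) := by
  rw [MX, dif_neg h]

theorem faW_le (s : List Char) (j w : Nat) : faW s j w ≤ w := by
  induction hd : w - j generalizing j with
  | zero =>
    rcases Nat.lt_or_ge j w with h | h
    · omega
    · rw [faW_stop s j w (by omega)]
  | succ n ih =>
    have h : j < w := by omega
    rw [faW_step s j w h]
    split
    · omega
    · exact ih (j + 1) (by omega)

theorem faW_ge (s : List Char) (j w : Nat) (h : j ≤ w) : j ≤ faW s j w := by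
  induction hd : w - j generalizing j with
  | zero => rw [faW_stop s j w (by omega)]; exact h
  | succ n ih =>
    have hjw : j < w := by omega
    rw [faW_step s j w hjw]
    split
    · omega
    · exact le_trans (by omega) (ih (j + 1) (by omega) (by omega))

theorem faW_lt_a (s : List Char) (j w : Nat) (h : faW s j w < w) :
    chAt s ((faW s j w)) = 'a' := by
  induction hd : w - j generalizing j with
  | zero =>
    rcases Nat.lt_or_ge j w with hjw | hjw
    · omega
    · rw [faW_stop s j w (by omega)] at h; omega
  | succ n ih =>
    have hjw : j < w := by omega
    rw [faW_step s j w hjw] at h ⊢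
    split at h
    · rw [if_pos ‹_›]; assumption
    · rw [if_neg ‹_›]; exact ih (j + 1) h (by omega)

theorem faW_not_a (s : List Char) (j w k : Nat) (hk1 : j ≤ k) (hk2 : k < faW s j w) :
    chAt s (k) ≠ 'a' := by
  induction hd : w - j generalizing j with
  | zero =>
    have := faW_le s j w
    rcases Nat.lt_or_ge j w with hjw | hjw
    · omega
    · rw [faW_stop s j w (by omega)] at hk2; omega
  | succ n ih =>
    have hjw : j < w := by omega
    rw [faW_step s j w hjw] at hk2
    split at hk2
    · omega
    · rcases Nat.eq_or_lt_of_le hk1 with h | h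
      · subst h; assumption
      · exact ih (j + 1) (by omega) hk2 (by omega)

theorem cntC_split (ch : Char) (s : List Char) (j m w : Nat) (h1 : j ≤ m) (h2 : m ≤ w) :
    cntC ch s j w = cntC ch s j m + cntC ch s m w := by
  induction hd : m - j generalizing j with
  | zero =>
    have : j = m := by omega
    subst this; rw [cntC_stop ch s j j (by omega)]; omega
  | succ n ih =>
    have hj : j < m := by omega
    rw [cntC_step ch s j w (by omega), cntC_step ch s j m (by omega)]
    rw [ih (j + 1) (by omega) (by omega)]
    omega

theorem noA_skip (s : List Char) (j m w : Nat) (hjm : j ≤ m) (hmw : m ≤ w)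
    (h : ∀ k, j ≤ k → k < m → chAt s (k) ≠ 'a') :
    cntC 'a' s j w = cntC 'a' s m w ∧ pairC s j w = pairC s m w := by
  induction hd : m - j generalizing j with
  | zero =>
    have : j = m := by omega
    subst this; exact ⟨rfl, rfl⟩
  | succ n ih =>
    have hj : j < m := by omega
    have hja := h j (le_refl j) hj
    have step := ih (j + 1) (by omega) (fun k hk1 hk2 => h k (by omega) hk2) (by omega)
    refine ⟨?_, ?_⟩
    · rw [cntC_step 'a' s j w (by omega), if_neg hja, step.1]; omega
    · rw [pairC_step s j w (by omega), if_neg hja, step.2]; omega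

theorem cntC_succ_right (ch : Char) (s : List Char) (j w : Nat) (hj : j ≤ w) :
    cntC ch s j (w + 1) = cntC ch s j w + (if chAt s (w) = ch then 1 else 0) := by
  rw [cntC_split ch s j w (w + 1) hj (by omega)]
  rw [cntC_step ch s w (w + 1) (by omega), cntC_stop ch s (w + 1) (w + 1) (by omega)]
  omega

theorem pairC_succ_right (s : List Char) (j w : Nat) (hj : j ≤ w) :
    pairC s j (w + 1) = pairC s j w + (if chAt s (w) = 'b' then cntC 'a' s j w else 0) := by
  induction hd : w - j generalizing j with
  | zero =>
    have : j = w := by omega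
    subst this
    rw [pairC_step s j (j + 1) (by omega), pairC_stop s j j (by omega),
      pairC_stop s (j + 1) (j + 1) (by omega), cntC_stop 'b' s (j + 1) (j + 1) (by omega),
      cntC_stop 'a' s j j (by omega)]
    split_ifs <;> simp_all
  | succ n ih =>
    have hjw : j < w := by omega
    rw [pairC_step s j (w + 1) (by omega), pairC_step s j w (by omega)]
    rw [ih (j + 1) (by omega) (by omega)]
    rw [cntC_succ_right 'b' s (j + 1) w (by omega)]
    rw [cntC_step 'a' s j w (by omega)]
    split_ifs <;> omega

theorem segQ_succ_right (s : List Char) (j w : Nat) (hj : j ≤ w) :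
    segQ s j (w + 1) = segQ s j w ++
      (if chAt s (w) = 'a' ∨ chAt s (w) = 'b' then [(chAt s (w), (w : Int))] else []) := by
  induction hd : w - j generalizing j with
  | zero =>
    have : j = w := by omega
    subst this
    rw [segQ_step s j (j + 1) (by omega), segQ_stop s j j (by omega),
      segQ_stop s (j + 1) (j + 1) (by omega)]
    simp
  | succ n ih =>
    have hjw : j < w := by omega
    rw [segQ_step s j (w + 1) (by omega), segQ_step s j w (by omega)]
    rw [ih (j + 1) (by omega) (by omega)]
    simp

theorem faW_succ_right (s : List Char) (j w : Nat) (hj : j ≤ w) :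
    faW s j (w + 1) = if faW s j w < w then faW s j w
      else (if chAt s (w) = 'a' then w else w + 1) := by
  induction hd : w - j generalizing j with
  | zero =>
    have : j = w := by omega
    subst this
    rw [faW_step s j (j + 1) (by omega), faW_stop s j j (by omega),
      faW_stop s (j + 1) (j + 1) (by omega)]
    simp
  | succ n ih =>
    have hjw : j < w := by omega
    rw [faW_step s j (w + 1) (by omega), faW_step s j w (by omega)]
    by_cases h : chAt s (j) = 'a'
    · simp [h, hjw]
    · rw [if_neg h, if_neg h]
      exact ih (j + 1) (by omega) (by omega)

theorem segQ_fa_cons (s : List Char) (j w : Nat) (h : faW s j w < w) :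
    segQ s (faW s j w) w = ('a', ((faW s j w : Nat) : Int)) :: segQ s (faW s j w + 1) w := by
  have ha := faW_lt_a s j w h
  rw [segQ_step s (faW s j w) w h]
  simp [ha]

theorem getD_some (s : List Char) (w : Nat) (h : w < s.length) :
    PySem.List.pyGet? s (w : Int) = some (chAt s (w)) := by
  rw [PySem.List.pyGet?_natCast]
  simp [chAt, List.getElem?_eq_getElem h]

theorem ccDropBs_seg (s : List Char) (w : Nat) : ∀ (j : Nat) (cb : Int), j ≤ w →
    ccDropBs (segQ s j w) cb = (segQ s (faW s j w) w, cb - (cntC 'b' s j (faW s j w) : Int)) := by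
  intro j cb hj
  induction hd : w - j generalizing j cb with
  | zero =>
    have hjw : j = w := by omega
    subst hjw
    rw [segQ_stop s j j (by omega), faW_stop s j j (by omega), cntC_stop 'b' s j j (by omega)]
    simp [ccDropBs, segQ_stop s j j (by omega)]
  | succ n ih =>
    have hjw : j < w := by omega
    have hfge := faW_ge s (j + 1) w (by omega)
    have hfle := faW_le s (j + 1) w
    by_cases ha : chAt s j = 'a'
    · rw [faW_step s j w hjw, if_pos ha]
      rw [cntC_stop 'b' s j j (by omega)]
      rw [segQ_step s j w hjw, if_pos (Or.inl ha), ha]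
      simp [ccDropBs]
    · rw [faW_step s j w hjw, if_neg ha]
      by_cases hb : chAt s j = 'b'
      · rw [segQ_step s j w hjw, if_pos (Or.inr hb), hb]
        have hred : ccDropBs ([('b', (j : Int))] ++ segQ s (j + 1) w) cb
            = ccDropBs (segQ s (j + 1) w) (cb - 1) := by simp [ccDropBs]
        rw [hred, ih (j + 1) (cb - 1) (by omega) (by omega)]
        rw [cntC_step 'b' s j (faW s (j + 1) w) (by omega), if_pos hb]
        congr 1
        push_cast
        ring
      · rw [segQ_step s j w hjw, if_neg (by simp [ha, hb])]
        rw [List.nil_append, ih (j + 1) cb (by omega) (by omega)]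
        rw [cntC_step 'b' s j (faW s (j + 1) w) (by omega), if_neg hb]
        simp

theorem add_inv (s : List Char) (start w : Nat) (cc : CC) (h : QInv s start w cc)
    (hw : w < s.length) :
    QInv s start (w + 1) (ccAdd cc (chAt s w) ((w : Nat) : Int)).1 ∧
    (ccAdd cc (chAt s w) ((w : Nat) : Int)).2 = (ccAdd cc (chAt s w) ((w : Nat) : Int)).1.c := by
  obtain ⟨hsw, hwl, hq, hca, hcb, hc⟩ := h
  have hfle := faW_le s start w
  have hfge := faW_ge s start w hsw
  have hfsucc := faW_succ_right s start w (by omega)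
  have hsegs := segQ_succ_right s (faW s start w) w (by omega)
  have hcas := cntC_succ_right 'a' s (faW s start w) w (by omega)
  have hcbs := cntC_succ_right 'b' s (faW s start w) w (by omega)
  have hpcs := pairC_succ_right s (faW s start w) w (by omega)
  by_cases ha : chAt s w = 'a'
  · have hfa' : faW s start (w + 1) = faW s start w := by
      rw [hfsucc]
      by_cases hlt : faW s start w < w
      · rw [if_pos hlt]
      · rw [if_neg hlt, if_pos ha]; omega
    rw [ha] at hsegs hcas hcbs hpcs ⊢
    have hAdd : ccAdd cc 'a' ((w : Nat) : Int)
        = (⟨cc.queue ++ [('a', (w : Int))], cc.c, cc.cnt_a + 1, cc.cnt_b⟩, cc.c) := by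
      simp [ccAdd]
    rw [hAdd]
    refine ⟨⟨by omega, by omega, ?_, ?_, ?_, ?_⟩, rfl⟩
    · show cc.queue ++ _ = _
      rw [hfa', hsegs, hq]; simp
    · show cc.cnt_a + 1 = _
      rw [hfa', hcas, hca]; simp
    · show cc.cnt_b = _
      rw [hfa', hcbs, hcb]; simp
    · show cc.c = _
      rw [hfa', hpcs, hc]; simp
  · by_cases hb : chAt s w = 'b'
    · rw [hb] at hsegs hcas hcbs hpcs ⊢
      by_cases hlt : faW s start w < w
      · have hfa' : faW s start (w + 1) = faW s start w := by rw [hfsucc, if_pos hlt]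
        have hqcons := segQ_fa_cons s start w hlt
        have hnemp : cc.queue.isEmpty = false := by rw [hq, hqcons]; rfl
        have hAdd : ccAdd cc 'b' ((w : Nat) : Int)
            = (⟨cc.queue ++ [('b', (w : Int))], cc.c + cc.cnt_a, cc.cnt_a, cc.cnt_b + 1⟩,
                cc.c + cc.cnt_a) := by
          simp [ccAdd, hnemp]
        rw [hAdd]
        refine ⟨⟨by omega, by omega, ?_, ?_, ?_, ?_⟩, rfl⟩
        · show cc.queue ++ _ = _
          rw [hfa', hsegs, hq]; simp
        · show cc.cnt_a = _
          rw [hfa', hcas, hca]; simp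
        · show cc.cnt_b + 1 = _
          rw [hfa', hcbs, hcb]; simp
        · show cc.c + cc.cnt_a = _
          rw [hfa', hpcs, hc, hca]; simp
      · have hfaw : faW s start w = w := by omega
        have hfa' : faW s start (w + 1) = w + 1 := by
          rw [hfsucc, if_neg hlt, if_neg ha]
        have hemp : cc.queue.isEmpty = true := by
          rw [hq, hfaw, segQ_stop s w w (by omega)]; rfl
        have hAdd : ccAdd cc 'b' ((w : Nat) : Int) = (cc, cc.c) := by
          simp [ccAdd, hemp]
        rw [hAdd]
        refine ⟨⟨by omega, by omega, ?_, ?_, ?_, ?_⟩, rfl⟩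
        · rw [hfa', segQ_stop s (w + 1) (w + 1) (by omega), hq, hfaw,
            segQ_stop s w w (by omega)]
        · rw [hfa', cntC_stop 'a' s (w + 1) (w + 1) (by omega), hca, hfaw,
            cntC_stop 'a' s w w (by omega)]
        · rw [hfa', cntC_stop 'b' s (w + 1) (w + 1) (by omega), hcb, hfaw,
            cntC_stop 'b' s w w (by omega)]
        · rw [hfa', pairC_stop s (w + 1) (w + 1) (by omega), hc, hfaw,
            pairC_stop s w w (by omega)]
    · have hAdd : ccAdd cc (chAt s w) ((w : Nat) : Int) = (cc, cc.c) := by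
        simp [ccAdd, ha, hb]
      rw [hAdd]
      have hfa' : faW s start (w + 1) = if faW s start w < w then faW s start w else w + 1 := by
        rw [hfsucc]
        by_cases hlt : faW s start w < w
        · rw [if_pos hlt, if_pos hlt]
        · rw [if_neg hlt, if_neg ha, if_neg hlt]
      refine ⟨⟨by omega, by omega, ?_, ?_, ?_, ?_⟩, rfl⟩
      · by_cases hlt : faW s start w < w
        · rw [hfa', if_pos hlt, hsegs, if_neg (by simp [ha, hb]), hq]; simp
        · rw [hfa', if_neg hlt, segQ_stop s (w + 1) (w + 1) (by omega), hq,
            segQ_stop s (faW s start w) w (by omega)]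
      · by_cases hlt : faW s start w < w
        · rw [hfa', if_pos hlt, hcas, if_neg ha, hca]; simp
        · rw [hfa', if_neg hlt, cntC_stop 'a' s (w + 1) (w + 1) (by omega), hca,
            cntC_stop 'a' s (faW s start w) w (by omega)]
      · by_cases hlt : faW s start w < w
        · rw [hfa', if_pos hlt, hcbs, if_neg hb, hcb]; simp
        · rw [hfa', if_neg hlt, cntC_stop 'b' s (w + 1) (w + 1) (by omega), hcb,
            cntC_stop 'b' s (faW s start w) w (by omega)]
      · by_cases hlt : faW s start w < w
        · rw [hfa', if_pos hlt, hpcs, if_neg hb, hc]; simp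
        · rw [hfa', if_neg hlt, pairC_stop s (w + 1) (w + 1) (by omega), hc,
            pairC_stop s (faW s start w) w (by omega)]

-- cc.c is the pair count of the whole window [start, w)
theorem ccC_eq (s : List Char) (start w : Nat) (cc : CC) (h : QInv s start w cc) :
    cc.c = (pairC s start w : Int) := by
  obtain ⟨hsw, _, _, _, _, hc⟩ := h
  have hskip := noA_skip s start (faW s start w) w (faW_ge s start w hsw) (faW_le s start w)
    (fun k hk1 hk2 => faW_not_a s start w k hk1 hk2)
  rw [hc, hskip.2]

theorem pairC_anti (s : List Char) (l l' w : Nat) (h : l ≤ l') :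
    pairC s l' w ≤ pairC s l w := by
  induction hd : l' - l generalizing l with
  | zero =>
    have : l = l' := by omega
    subst this; exact le_refl _
  | succ n ih =>
    have hll : l < l' := by omega
    by_cases hw : l < w
    · rw [pairC_step s l w hw]
      have := ih (l + 1) (by omega) (by omega)
      omega
    · rw [pairC_stop s l w hw]
      rw [pairC_stop s l' w (by omega)]

theorem pairC_mono_right (s : List Char) (l w w' : Nat) (h : w ≤ w') :
    pairC s l w ≤ pairC s l w' := by
  induction hd : w' - w generalizing w' with
  | zero =>
    have : w = w' := by omega
    subst this; exact le_refl _
  | succ n ih =>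
    have hlt : w < w' := by omega
    by_cases hlw : l ≤ w' - 1
    · have h1 := ih (w' - 1) (by omega) (by omega)
      have h2 := pairC_succ_right s l (w' - 1) hlw
      have : w' - 1 + 1 = w' := by omega
      rw [this] at h2
      split at h2 <;> omega
    · rw [pairC_stop s l w (by omega), pairC_stop s l w' (by omega)]

theorem mnl_unique (s : List Char) (lim : Int) (w l : Nat) (hl : l ≤ w)
    (hok : (pairC s l w : Int) ≤ lim) (hno : ∀ k : Nat, k < l → lim < (pairC s k w : Int)) :
    mnl s lim 0 w = l := by
  have haux : ∀ j : Nat, j ≤ l → mnl s lim j w = l := by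
    intro j hj
    induction hd : l - j generalizing j with
    | zero =>
      have : j = l := by omega
      subst this
      rcases Nat.lt_or_ge j w with hjw | hjw
      · rw [mnl_step s lim j w hjw, if_pos hok]
      · rw [mnl_stop s lim j w (by omega)]; omega
    | succ n ih =>
      have hjl : j < l := by omega
      rw [mnl_step s lim j w (by omega), if_neg (by have := hno j hjl; omega)]
      exact ih (j + 1) (by omega) (by omega)
  exact haux 0 (by omega)

theorem mnl_eq_of_all_not (s : List Char) (lim : Int) (w : Nat)
    (hno : ∀ k : Nat, k < w → lim < (pairC s k w : Int)) : mnl s lim 0 w = w := by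
  have haux : ∀ j : Nat, j ≤ w → mnl s lim j w = w := by
    intro j hj
    induction hd : w - j generalizing j with
    | zero => rw [mnl_stop s lim j w (by omega)]
    | succ n ih =>
      have hjw : j < w := by omega
      rw [mnl_step s lim j w hjw, if_neg (by have := hno j hjw; omega)]
      exact ih (j + 1) (by omega) (by omega)
  exact haux 0 (by omega)

theorem MX_ge (s : List Char) (lim : Int) (w n : Nat) (h : w ≤ n) :
    (w : Int) - (mnl s lim 0 w : Int) ≤ MX s lim w n := by
  by_cases hlt : w < n
  · rw [MX_step s lim w n hlt]
    exact le_max_left _ _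
  · have : w = n := by omega
    subst this
    rw [MX_stop s lim w w (by omega)]

theorem shrink_min (s : List Char) (lim : Int) :
    ∀ (fuel : Nat) (start : Nat) (cc : CC) (w : Nat), QInv s start w cc →
    (∀ l : Nat, l < start → lim < (pairC s l w : Int)) → 0 ≤ lim → w - start < fuel →
    ∃ (start' : Nat) (cc' : CC),
      ccShrink fuel cc cc.c lim (start : Int) = some (cc', (start' : Int)) ∧
      QInv s start' w cc' ∧ MInv s lim start' w := by
  intro fuel
  induction fuel with
  | zero => intro start cc w _ _ _ hf; omega
  | succ fuel ih =>
  intro start cc w hinv hno hlim hf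
  obtain ⟨hsw, hwl, hq, hca, hcb, hc⟩ := hinv
  by_cases hgt : cc.c > lim
  · have hcpos : (0 : Int) < cc.c := by omega
    have hlt : faW s start w < w := by
      by_contra hge
      have hfaw : faW s start w = w := by have := faW_le s start w; omega
      rw [hc, hfaw, pairC_stop s w w (by omega)] at hcpos
      simp at hcpos
    have hfge := faW_ge s start w hsw
    have hfge2 := faW_ge s (faW s start w + 1) w (by omega)
    have hfle2 := faW_le s (faW s start w + 1) w
    have ha := faW_lt_a s start w hlt
    have hqcons := hq.trans (segQ_fa_cons s start w hlt)
    have hdrop := ccDropBs_seg s w (faW s start w + 1) cc.cnt_b (by omega)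
    have hpop : ccPop cc = some
        (⟨segQ s (faW s (faW s start w + 1) w) w, cc.c - cc.cnt_b, cc.cnt_a - 1,
          cc.cnt_b - (cntC 'b' s (faW s start w + 1) (faW s (faW s start w + 1) w) : Int)⟩,
          ((faW s start w : Nat) : Int)) := by
      unfold ccPop
      rw [hqcons]
      show (if 'a' = 'a' then _ else none) = _
      rw [if_pos rfl, hdrop]
    have hinv1 : QInv s (faW s start w + 1) w
        ⟨segQ s (faW s (faW s start w + 1) w) w, cc.c - cc.cnt_b, cc.cnt_a - 1,
          cc.cnt_b - (cntC 'b' s (faW s start w + 1) (faW s (faW s start w + 1) w) : Int)⟩ := by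
      have hskip := noA_skip s (faW s start w + 1) (faW s (faW s start w + 1) w) w hfge2 hfle2
        (fun k hk1 hk2 => faW_not_a s (faW s start w + 1) w k hk1 (by omega))
      refine ⟨by omega, hwl, rfl, ?_, ?_, ?_⟩
      · show cc.cnt_a - 1 = _
        rw [hca, cntC_step 'a' s (faW s start w) w hlt, if_pos ha, hskip.1]
        push_cast; ring
      · show cc.cnt_b - _ = _
        rw [hcb, cntC_step 'b' s (faW s start w) w hlt, if_neg (by rw [ha]; decide)]
        rw [cntC_split 'b' s (faW s start w + 1) (faW s (faW s start w + 1) w) w hfge2 hfle2]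
        push_cast; ring
      · show cc.c - cc.cnt_b = _
        rw [hc, hcb, pairC_step s (faW s start w) w hlt, if_pos ha,
          cntC_step 'b' s (faW s start w) w hlt, if_neg (by rw [ha]; decide), hskip.2]
        push_cast; ring
    have hno1 : ∀ l : Nat, l < faW s start w + 1 → lim < (pairC s l w : Int) := by
      intro l hl
      rcases Nat.lt_or_ge l start with hls | hls
      · exact hno l hls
      · have hskipl := noA_skip s l (faW s start w) w (by omega) (by omega)
          (fun k hk1 hk2 => faW_not_a s start w k (by omega) hk2)
        rw [hskipl.2, ← hc]
        exact hgt
    obtain ⟨start', cc', hA, hinv', hminv'⟩ := ih (faW s start w + 1) _ w hinv1 hno1 hlim (by omega)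
    refine ⟨start', cc', ?_, hinv', hminv'⟩
    rw [ccShrink, if_pos hgt, hpop]
    have hcast : ((faW s start w : Nat) : Int) + 1 = ((faW s start w + 1 : Nat) : Int) := by
      push_cast; ring
    show ccShrink fuel _ _ lim (((faW s start w : Nat) : Int) + 1) = _
    rw [hcast]
    exact hA
  · refine ⟨start, cc, ?_, ⟨hsw, hwl, hq, hca, hcb, hc⟩, ?_, hno⟩
    · rw [ccShrink, if_neg hgt]
    · have := ccC_eq s start w cc ⟨hsw, hwl, hq, hca, hcb, hc⟩
      omega

theorem loopA_lt (fuel : Nat) (s : List Char) (c_limit i : Int) (cc : CC)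
    (start max_len : Int) (ch : Char)
    (hi : i < (s.length : Int)) (hg : PySem.List.pyGet? s i = some ch) :
    loopA (fuel + 1) s c_limit i cc start max_len =
      (if (ccAdd cc ch i).2 > c_limit then
        match ccShrink (s.length + 1) (ccAdd cc ch i).1 (ccAdd cc ch i).2 c_limit start with
        | none => none
        | some (cc2, start') => loopA fuel s c_limit (i + 1) cc2 start' (max max_len (i - start))
      else loopA fuel s c_limit (i + 1) (ccAdd cc ch i).1 start max_len) := by
  rw [loopA, if_pos hi, hg]

theorem loopA_res (s : List Char) (lim : Int) (hlim : 0 ≤ lim) :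
    ∀ (fuel : Nat) (w start : Nat) (cc : CC) (max_len : Int), QInv s start w cc →
    MInv s lim start w → s.length - w < fuel →
    ∃ res : Int × Int, loopA fuel s lim (w : Int) cc (start : Int) max_len = some res ∧
      max res.1 ((s.length : Int) - res.2) = max max_len (MX s lim w s.length) := by
  intro fuel
  induction fuel with
  | zero => intro w start cc max_len _ _ hf; omega
  | succ fuel ih =>
  intro w start cc max_len hinv hminv hf
  have hsw : start ≤ w := hinv.1
  have hwle : w ≤ s.length := hinv.2.1
  have hmnlw : mnl s lim 0 w = start := mnl_unique s lim w start hsw hminv.1 hminv.2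
  by_cases hw : w < s.length
  · have hwi : (w : Int) < (s.length : Int) := by exact_mod_cast hw
    have hget := getD_some s w hw
    obtain ⟨hinv1, hr2⟩ := add_inv s start w cc hinv hw
    have hc1 : (ccAdd cc (chAt s w) ((w : Nat) : Int)).1.c = (pairC s start (w + 1) : Int) :=
      ccC_eq s start (w + 1) _ hinv1
    have hmono : ∀ l : Nat, l < start → lim < (pairC s l (w + 1) : Int) := by
      intro l hl
      have h1 := hminv.2 l hl
      have h2 := pairC_mono_right s l w (w + 1) (by omega)
      omega
    rw [loopA_lt fuel s lim (w : Int) cc (start : Int) max_len (chAt s w) hwi hget]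
    have hcast1 : (w : Int) + 1 = ((w + 1 : Nat) : Int) := by push_cast; ring
    by_cases hv : (ccAdd cc (chAt s w) ((w : Nat) : Int)).2 > lim
    · rw [if_pos hv]
      have hvc : (ccAdd cc (chAt s w) ((w : Nat) : Int)).1.c > lim := by rw [← hr2]; exact hv
      obtain ⟨start', cc', hshr, hinv', hminv'⟩ := shrink_min s lim (s.length + 1) start
        (ccAdd cc (chAt s w) ((w : Nat) : Int)).1 (w + 1) hinv1 hmono hlim (by omega)
      obtain ⟨res, hres, hresval⟩ := ih (w + 1) start' cc'
        (max max_len ((w : Int) - (start : Int))) hinv' hminv' (by omega)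
      refine ⟨res, ?_, ?_⟩
      · rw [hr2, hshr, hcast1]
        exact hres
      · rw [hresval, MX_step s lim w s.length hw, hmnlw, max_assoc]
    · rw [if_neg hv]
      have hvc : (ccAdd cc (chAt s w) ((w : Nat) : Int)).1.c ≤ lim := by rw [← hr2]; omega
      have hminv1 : MInv s lim start (w + 1) := ⟨by rw [← hc1]; exact hvc, hmono⟩
      have hmnlw1 : mnl s lim 0 (w + 1) = start :=
        mnl_unique s lim (w + 1) start (by omega) hminv1.1 hminv1.2
      have hMX : MX s lim w s.length = MX s lim (w + 1) s.length := by
        rw [MX_step s lim w s.length hw, hmnlw]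
        have h1 := MX_ge s lim (w + 1) s.length (by omega)
        rw [hmnlw1] at h1
        have : (w : Int) - (start : Int) ≤ MX s lim (w + 1) s.length := by omega
        exact max_eq_right this
      obtain ⟨res, hres, hresval⟩ := ih (w + 1) start
        (ccAdd cc (chAt s w) ((w : Nat) : Int)).1 max_len hinv1 hminv1 (by omega)
      refine ⟨res, ?_, ?_⟩
      · rw [hcast1]
        exact hres
      · rw [hresval, hMX]
  · have hwn : w = s.length := by omega
    have hwi : ¬ (w : Int) < (s.length : Int) := by
      simp only [not_lt]
      omega
    rw [loopA, if_neg hwi]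
    refine ⟨(max_len, (start : Int)), rfl, ?_⟩
    subst hwn
    rw [MX_stop s lim s.length s.length (by omega), hmnlw]

-- ===== B-side lemmas =====

def paL (s : List Char) (k : Nat) : List Int := (List.range (k + 1)).map (fun i => ((cntC 'a' s 0 i : Nat) : Int))
def pbL (s : List Char) (k : Nat) : List Int := (List.range (k + 1)).map (fun i => ((cntC 'b' s 0 i : Nat) : Int))
def ppL (s : List Char) (k : Nat) : List Int := (List.range (k + 1)).map (fun i => ((pairC s 0 i : Nat) : Int))

theorem buildB_spec (s : List Char) : ∀ (i : Nat), i ≤ s.length →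
    buildB (s.drop i) (paL s i) (pbL s i) (ppL s i)
      ((cntC 'a' s 0 i : Nat) : Int) ((cntC 'b' s 0 i : Nat) : Int) ((pairC s 0 i : Nat) : Int)
      = (paL s s.length, pbL s s.length, ppL s s.length) := by
  intro i hi
  induction hd : s.length - i generalizing i with
  | zero =>
    have : i = s.length := by omega
    subst this
    rw [List.drop_of_length_le (le_refl _)]
    rfl
  | succ n ih =>
    have hlt : i < s.length := by omega
    have hdrop : s.drop i = s[i] :: s.drop (i + 1) := List.drop_eq_getElem_cons hlt
    have hch : s[i] = chAt s i := by simp [chAt, List.getElem?_eq_getElem hlt]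
    rw [hdrop, hch]
    have hca := cntC_succ_right 'a' s 0 i (by omega)
    have hcb := cntC_succ_right 'b' s 0 i (by omega)
    have hpp := pairC_succ_right s 0 i (by omega)
    have ha' : (if chAt s i = 'a' then ((cntC 'a' s 0 i : Nat) : Int) + 1 else ((cntC 'a' s 0 i : Nat) : Int))
        = ((cntC 'a' s 0 (i + 1) : Nat) : Int) := by
      rw [hca]; split_ifs <;> push_cast <;> ring
    have hb' : (if chAt s i = 'a' then ((cntC 'b' s 0 i : Nat) : Int)
          else if chAt s i = 'b' then ((cntC 'b' s 0 i : Nat) : Int) + 1 else ((cntC 'b' s 0 i : Nat) : Int))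
        = ((cntC 'b' s 0 (i + 1) : Nat) : Int) := by
      rw [hcb]
      by_cases h1 : chAt s i = 'a'
      · rw [if_pos h1, if_neg (by rw [h1]; decide)]; push_cast; ring
      · rw [if_neg h1]; split_ifs <;> push_cast <;> ring
    have hp' : (if chAt s i = 'a' then ((pairC s 0 i : Nat) : Int)
          else if chAt s i = 'b' then ((pairC s 0 i : Nat) : Int) + ((cntC 'a' s 0 i : Nat) : Int)
          else ((pairC s 0 i : Nat) : Int))
        = ((pairC s 0 (i + 1) : Nat) : Int) := by
      rw [hpp]
      by_cases h1 : chAt s i = 'a'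
      · rw [if_pos h1, if_neg (by rw [h1]; decide)]; push_cast; ring
      · rw [if_neg h1]; split_ifs <;> push_cast <;> ring
    have hpaE : paL s i ++ [((cntC 'a' s 0 (i + 1) : Nat) : Int)] = paL s (i + 1) := by
      unfold paL
      conv_rhs => rw [List.range_succ]
      simp
    have hpbE : pbL s i ++ [((cntC 'b' s 0 (i + 1) : Nat) : Int)] = pbL s (i + 1) := by
      unfold pbL
      conv_rhs => rw [List.range_succ]
      simp
    have hppE : ppL s i ++ [((pairC s 0 (i + 1) : Nat) : Int)] = ppL s (i + 1) := by
      unfold ppL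
      conv_rhs => rw [List.range_succ]
      simp
    show buildB _ _ _ _ _ _ _ = _
    rw [buildB]
    simp only [ha', hb', hp', hpaE, hpbE, hppE]
    exact ih (i + 1) (by omega) (by omega)

theorem getI_paL (s : List Char) (n m : Nat) (h : m ≤ n) :
    getI (paL s n) (m : Int) = ((cntC 'a' s 0 m : Nat) : Int) := by
  unfold getI paL
  rw [PySem.List.pyGet?_natCast]
  simp [List.getElem?_map, List.getElem?_range (by omega : m < n + 1)]

theorem getI_pbL (s : List Char) (n m : Nat) (h : m ≤ n) :
    getI (pbL s n) (m : Int) = ((cntC 'b' s 0 m : Nat) : Int) := by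
  unfold getI pbL
  rw [PySem.List.pyGet?_natCast]
  simp [List.getElem?_map, List.getElem?_range (by omega : m < n + 1)]

theorem getI_ppL (s : List Char) (n m : Nat) (h : m ≤ n) :
    getI (ppL s n) (m : Int) = ((pairC s 0 m : Nat) : Int) := by
  unfold getI ppL
  rw [PySem.List.pyGet?_natCast]
  simp [List.getElem?_map, List.getElem?_range (by omega : m < n + 1)]

-- pp[r] - pp[l] - pa[l] * (pb[r] - pb[l]) counts the pairs inside [l, r)
theorem pairs_formula (s : List Char) (l r : Nat) (h : l ≤ r) :
    ((pairC s 0 r : Nat) : Int) - (pairC s 0 l : Nat)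
      - ((cntC 'a' s 0 l : Nat) : Int) * (((cntC 'b' s 0 r : Nat) : Int) - (cntC 'b' s 0 l : Nat))
      = ((pairC s l r : Nat) : Int) := by
  have hsplit3 : pairC s 0 r = pairC s 0 l + pairC s l r + cntC 'a' s 0 l * cntC 'b' s l r := by
    induction hd : r - l generalizing r with
    | zero =>
      have hrl : r = l := by omega
      rw [hrl, pairC_stop s l l (by omega), cntC_stop 'b' s l l (by omega)]
      omega
    | succ n ih =>
      have hlr : l < r := by omega
      have h1 := pairC_succ_right s 0 (r - 1) (by omega)
      have h2 := pairC_succ_right s l (r - 1) (by omega)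
      have h3 := cntC_succ_right 'b' s l (r - 1) (by omega)
      have h4 := cntC_split 'a' s 0 l (r - 1) (by omega) (by omega)
      have hr1 : r - 1 + 1 = r := by omega
      rw [hr1] at h1 h2 h3
      have hIH := ih (r - 1) (by omega) (by omega)
      rw [h1, h2, h3, hIH]
      by_cases hb : chAt s (r - 1) = 'b'
      · rw [if_pos hb, if_pos hb, if_pos hb, h4, Nat.mul_add, Nat.mul_one]
        set X := cntC 'a' s 0 l * cntC 'b' s l (r - 1) with hX
        omega
      · rw [if_neg hb, if_neg hb, if_neg hb]
        simp only [Nat.add_zero]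
  have h2 := cntC_split 'b' s 0 l r (by omega) h
  rw [hsplit3, h2]
  push_cast
  ring

theorem bsearchB_res (s : List Char) (lim : Int) (r n : Nat) (hr : r ≤ n) :
    ∀ (fuel lo hi : Nat), lo ≤ hi → hi ≤ r →
    (∀ k : Nat, k < lo → lim < (pairC s k r : Int)) →
    ((pairC s hi r : Int) ≤ lim ∨ hi = r) → hi - lo < fuel →
    bsearchB fuel (paL s n) (pbL s n) (ppL s n) lim (r : Int) (lo : Int) (hi : Int)
      = some ((mnl s lim 0 r : Nat) : Int) := by
  intro fuel
  induction fuel with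
  | zero => intro lo hi _ _ _ _ hf; omega
  | succ fuel ih =>
  intro lo hi hlohi hhir hno hok hf
  by_cases hlt : lo < hi
  · have hlti : (lo : Int) < (hi : Int) := by exact_mod_cast hlt
    have hmid : PySem.Int.floordiv ((lo : Int) + (hi : Int)) 2 = (((lo + hi) / 2 : Nat) : Int) := by
      rw [PySem.Int.floordiv_eq_ediv_of_pos (by norm_num)]
      omega
    have hm1 : lo ≤ (lo + hi) / 2 := by omega
    have hm2 : (lo + hi) / 2 < hi := by omega
    have hPA := getI_paL s n ((lo + hi) / 2) (by omega)
    have hPB := getI_pbL s n ((lo + hi) / 2) (by omega)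
    have hPP := getI_ppL s n ((lo + hi) / 2) (by omega)
    have hPBr := getI_pbL s n r hr
    have hPPr := getI_ppL s n r hr
    have hform := pairs_formula s ((lo + hi) / 2) r (by omega)
    rw [bsearchB]
    simp only [if_pos hlti, hmid, hPA, hPB, hPP, hPBr, hPPr, hform]
    by_cases hcond : ((pairC s ((lo + hi) / 2) r : Nat) : Int) ≤ lim
    · rw [if_pos hcond]
      exact ih lo ((lo + hi) / 2) hm1 (by omega) hno (Or.inl hcond) (by omega)
    · rw [if_neg hcond]
      have hno' : ∀ k : Nat, k < (lo + hi) / 2 + 1 → lim < (pairC s k r : Int) := by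
        intro k hk
        rcases Nat.lt_or_ge k lo with h1 | h1
        · exact hno k h1
        · have := pairC_anti s k ((lo + hi) / 2) r (by omega)
          omega
      have hcast : ((((lo + hi) / 2 : Nat) : Int) + 1) = (((lo + hi) / 2 + 1 : Nat) : Int) := by
        push_cast; ring
      rw [hcast]
      exact ih ((lo + hi) / 2 + 1) hi (by omega) hhir hno' hok (by omega)
  · have heq : lo = hi := by omega
    subst heq
    rw [bsearchB, if_neg (by exact_mod_cast hlt)]
    rcases hok with hok | hok
    · rw [mnl_unique s lim r lo (by omega) hok hno]
    · subst hok
      rw [mnl_eq_of_all_not s lim lo hno]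

theorem outerB_res (s : List Char) (lim : Int) :
    ∀ (fuel r : Nat) (best : Int), 1 ≤ r → r ≤ s.length → s.length + 1 - r < fuel →
    outerB fuel (paL s s.length) (pbL s s.length) (ppL s s.length) lim (s.length : Int) (r : Int) best
      = some (max best (MX s lim r s.length)) := by
  intro fuel
  induction fuel with
  | zero => intro r best _ _ hf; omega
  | succ fuel ih =>
  intro r best h1r hrn hf
  have hri : (r : Int) < (s.length : Int) + 1 := by exact_mod_cast (by omega : r < s.length + 1)
  have htn : ((s.length : Int)).toNat = s.length := by simp
  have hbs := bsearchB_res s lim r s.length hrn (s.length + 1) 0 r (by omega) (le_refl r)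
    (by intro k hk; omega) (Or.inr rfl) (by omega)
  rw [outerB, if_pos hri, htn]
  show (match bsearchB (s.length + 1) _ _ _ lim (r : Int) ((0 : Nat) : Int) (r : Int) with
    | none => none
    | some lo => outerB fuel _ _ _ lim _ ((r : Int) + 1) (max best ((r : Int) - lo))) = _
  rw [hbs]
  show outerB fuel (paL s s.length) (pbL s s.length) (ppL s s.length) lim ((s.length : Nat) : Int)
    ((r : Int) + 1) (max best ((r : Int) - ((mnl s lim 0 r : Nat) : Int))) = _
  have hcast : (r : Int) + 1 = ((r + 1 : Nat) : Int) := by push_cast; ring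
  rw [hcast]
  rcases Nat.lt_or_ge r s.length with hlt | hge
  · rw [ih (r + 1) (max best ((r : Int) - ((mnl s lim 0 r : Nat) : Int))) (by omega) (by omega) (by omega)]
    rw [MX_step s lim r s.length hlt, max_assoc]
  · have hreq : r = s.length := by omega
    have hstop : ¬ ((r + 1 : Nat) : Int) < (s.length : Int) + 1 := by
      exact_mod_cast (by omega : ¬ ((r + 1 : Nat) : Int) < ((s.length + 1 : Nat) : Int))
    cases fuel with
    | zero => omega
    | succ fuel' =>
      rw [outerB, if_neg hstop]
      rw [MX_stop s lim r s.length (by omega), hreq]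

theorem qinv_init (s : List Char) : QInv s 0 0 ⟨[], 0, 0, 0⟩ := by
  refine ⟨le_refl 0, Nat.zero_le _, ?_, ?_, ?_, ?_⟩ <;>
    rw [faW_stop s 0 0 (by omega)] <;>
    simp [segQ_stop s 0 0 (by omega), cntC_stop _ s 0 0 (by omega), pairC_stop s 0 0 (by omega)]

theorem strLen_eq (string : String) : PySem.Str.len string = (string.toList.length : Int) := by
  simp [PySem.Str.len_eq]

-- ===== VERDICT (by name: the statements are the Claim_ definitions above) =====
theorem solution_spec : Claim_equal_solution := by
  intro string c_limit _hdom hpre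
  unfold Spec_solution solution solution_alt
  by_cases hn : string.toList.length = 0
  · have hnil : string.toList = [] := List.length_eq_zero_iff.mp hn
    have hstr : string = "" := String.toList_eq_nil_iff.mp hnil
    rw [hnil]
    norm_num [loopA.eq_def, outerB.eq_def, strLen_eq, hstr]
  · have hlim : 0 ≤ c_limit := by
      rcases hpre with h | h
      · exfalso; apply hn; rw [h]; rfl
      · exact h
    have hm0 : MInv string.toList c_limit 0 0 := by
      refine ⟨?_, fun l hl => absurd hl (by omega)⟩
      rw [pairC_stop string.toList 0 0 (by omega)]
      exact_mod_cast hlim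
    obtain ⟨res, hres, hval⟩ := loopA_res string.toList c_limit hlim
      (string.toList.length + 1) 0 0 ⟨[], 0, 0, 0⟩ 0 (qinv_init string.toList) hm0 (by omega)
    simp only [Nat.cast_zero] at hres
    rw [hres, strLen_eq]
    have hbuild := buildB_spec string.toList 0 (by omega)
    have hpa0 : paL string.toList 0 = [0] := by
      unfold paL
      simp [List.range_one, cntC_stop 'a' string.toList 0 0 (by omega)]
    have hpb0 : pbL string.toList 0 = [0] := by
      unfold pbL
      simp [List.range_one, cntC_stop 'b' string.toList 0 0 (by omega)]
    have hpp0 : ppL string.toList 0 = [0] := by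
      unfold ppL
      simp [List.range_one, pairC_stop string.toList 0 0 (by omega)]
    rw [List.drop_zero, hpa0, hpb0, hpp0, cntC_stop 'a' string.toList 0 0 (by omega),
      cntC_stop 'b' string.toList 0 0 (by omega), pairC_stop string.toList 0 0 (by omega)] at hbuild
    simp only [Nat.cast_zero] at hbuild
    simp only [hbuild]
    have houter := outerB_res string.toList c_limit (string.toList.length + 1) 1 0
      (le_refl 1) (by omega) (by omega)
    simp only [Nat.cast_one] at houter
    simp only [houter]
    rw [hval]
    rw [MX_step string.toList c_limit 0 string.toList.length (by omega),
      mnl_stop string.toList c_limit 0 0 (by omega)]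
    simp only [Nat.cast_zero, sub_self]
    rw [← max_assoc, max_self]
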